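-- pv_equiv track=rewrite | github.com/DeFiEye/BridgeEye | crosschain/metamask.py | from_token_not_to_token
-- ===== SOURCE A (Python) =====
-- def from_token_not_to_token(token1, token2):
--     if token1 == token2:
--         return False
--     derivative_tokens = [["WETH", "WETH.E"], ["WBTC", "BTCB", "WBTC.E", "BTC"], ["USDC", "USDC.E"], ["USDT", "USDT.E", "USDt"], ["DAI", "DAI.E", "XDAI"]]
--     for derivative_token in derivative_tokens:
--         if token1 in derivative_token and token2 in derivative_token:
--             return False
--     return True
-- ===== SOURCE B (Python) =====
-- _CANON = {"WETH.E": "WETH", "BTCB": "WBTC", "WBTC.E": "WBTC", "BTC": "WBTC",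
--           "USDC.E": "USDC", "USDT.E": "USDT", "USDt": "USDT",
--           "DAI.E": "DAI", "XDAI": "DAI"}
--
-- def from_token_not_to_token(token1, token2):
--     # Normalize each token to its derivative group's canonical representative
--     # (unknown tokens are their own canonical form), then compare.
--     return _CANON.get(token1, token1) != _CANON.get(token2, token2)
-- ===== Notes on version B (the rewrite author's own statement) =====
-- stated objective: alternative
-- what changed: A scans each derivative group testing joint membership; B instead normalizes each token to a canonical group representative via an alias map (unknown tokens map to themselves) and returns whether the two canonical forms differ, with no equality guard and no group scan.
import Mathlib
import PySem

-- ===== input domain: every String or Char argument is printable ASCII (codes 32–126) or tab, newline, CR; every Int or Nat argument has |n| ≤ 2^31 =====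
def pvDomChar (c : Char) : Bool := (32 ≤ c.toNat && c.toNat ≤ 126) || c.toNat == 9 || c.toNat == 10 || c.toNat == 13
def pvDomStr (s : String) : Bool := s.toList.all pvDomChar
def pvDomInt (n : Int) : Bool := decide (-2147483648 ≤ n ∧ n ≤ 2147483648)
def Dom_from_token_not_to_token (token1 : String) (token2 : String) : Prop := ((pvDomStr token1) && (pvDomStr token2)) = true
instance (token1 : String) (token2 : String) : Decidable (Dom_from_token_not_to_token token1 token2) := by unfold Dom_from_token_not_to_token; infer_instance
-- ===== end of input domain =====

-- B replaces A's joint-membership scan over the derivative groups by normalization: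
-- each token is mapped to its group's canonical representative (itself if unknown)
-- and the two canonical forms are compared; objective: alternative (no speed claim).

-- ===== PORT A =====
def pvGroupsA : List (List String) :=
  [["WETH", "WETH.E"], ["WBTC", "BTCB", "WBTC.E", "BTC"], ["USDC", "USDC.E"],
   ["USDT", "USDT.E", "USDt"], ["DAI", "DAI.E", "XDAI"]]

-- the 'for derivative_token in derivative_tokens' loop with its early return
def pvLoopA (token1 token2 : String) : List (List String) → Bool
  | [] => true
  | g :: rest =>
      if g.contains token1 && g.contains token2 then false
      else pvLoopA token1 token2 rest

def from_token_not_to_token (token1 : String) (token2 : String) : Bool :=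
  if token1 == token2 then false
  else pvLoopA token1 token2 pvGroupsA

-- ===== PORT B =====
-- _CANON alias map of Source B
def pvCanonDict : PySem.Dict String String :=
  PySem.Dict.ofList
    [("WETH.E", "WETH"), ("BTCB", "WBTC"), ("WBTC.E", "WBTC"), ("BTC", "WBTC"),
     ("USDC.E", "USDC"), ("USDT.E", "USDT"), ("USDt", "USDT"),
     ("DAI.E", "DAI"), ("XDAI", "DAI")]

def from_token_not_to_token_alt (token1 : String) (token2 : String) : Bool :=
  pvCanonDict.getD token1 token1 != pvCanonDict.getD token2 token2

-- ===== PRECONDITION & SPEC =====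
def Spec_from_token_not_to_token (token1 : String) (token2 : String) (out : Bool) : Prop := out = from_token_not_to_token_alt token1 token2
instance (token1 : String) (token2 : String) (out : Bool) : Decidable (Spec_from_token_not_to_token token1 token2 out) := by unfold Spec_from_token_not_to_token; infer_instance

-- ===== CLAIM (what is proved, stated in full; the proofs are below) =====
def Claim_equal_from_token_not_to_token : Prop := ∀ (token1 : String) (token2 : String), Dom_from_token_not_to_token token1 token2 → Spec_from_token_not_to_token token1 token2 (from_token_not_to_token token1 token2)

-- ===== LEMMAS AND PROOFS =====

-- tokens not occurring in any derivative group
def PvOutside (t : String) : Prop := t ≠ "WETH" ∧ t ≠ "WETH.E" ∧ t ≠ "WBTC" ∧ t ≠ "BTCB" ∧ t ≠ "WBTC.E" ∧ t ≠ "BTC" ∧ t ≠ "USDC" ∧ t ≠ "USDC.E" ∧ t ≠ "USDT" ∧ t ≠ "USDT.E" ∧ t ≠ "USDt" ∧ t ≠ "DAI" ∧ t ≠ "DAI.E" ∧ t ≠ "XDAI"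

lemma pv_tok_cases (t : String) :
    t = "WETH" ∨ t = "WETH.E" ∨ t = "WBTC" ∨ t = "BTCB" ∨ t = "WBTC.E" ∨ t = "BTC" ∨ t = "USDC" ∨ t = "USDC.E" ∨ t = "USDT" ∨ t = "USDT.E" ∨ t = "USDt" ∨ t = "DAI" ∨ t = "DAI.E" ∨ t = "XDAI" ∨ PvOutside t := by
  unfold PvOutside
  by_cases h0 : t = "WETH"; · tauto
  by_cases h1 : t = "WETH.E"; · tauto
  by_cases h2 : t = "WBTC"; · tauto
  by_cases h3 : t = "BTCB"; · tauto
  by_cases h4 : t = "WBTC.E"; · tauto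
  by_cases h5 : t = "BTC"; · tauto
  by_cases h6 : t = "USDC"; · tauto
  by_cases h7 : t = "USDC.E"; · tauto
  by_cases h8 : t = "USDT"; · tauto
  by_cases h9 : t = "USDT.E"; · tauto
  by_cases h10 : t = "USDt"; · tauto
  by_cases h11 : t = "DAI"; · tauto
  by_cases h12 : t = "DAI.E"; · tauto
  by_cases h13 : t = "XDAI"; · tauto
  tauto

lemma pv_canonDict_eq : pvCanonDict = PySem.Dict.mk
    [("WETH.E", "WETH"), ("BTCB", "WBTC"), ("WBTC.E", "WBTC"), ("BTC", "WBTC"),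
     ("USDC.E", "USDC"), ("USDT.E", "USDT"), ("USDt", "USDT"),
     ("DAI.E", "DAI"), ("XDAI", "DAI")] := by decide

lemma pv_canon_outside (t : String) (h : PvOutside t) : pvCanonDict.getD t t = t := by
  obtain ⟨n0,n1,n2,n3,n4,n5,n6,n7,n8,n9,n10,n11,n12,n13⟩ := h
  simp [pv_canonDict_eq, PySem.Dict.getD, PySem.Dict.get?_mk_cons,
    Ne.symm n1, Ne.symm n3, Ne.symm n4, Ne.symm n5, Ne.symm n7,
    Ne.symm n9, Ne.symm n10, Ne.symm n12, Ne.symm n13]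
  simp [PySem.Dict.get?]

-- the canonical form of any token is one of the five group heads or the token itself
lemma pv_canon_cases (t : String) :
    pvCanonDict.getD t t = "WETH" ∨ pvCanonDict.getD t t = "WBTC" ∨
    pvCanonDict.getD t t = "USDC" ∨ pvCanonDict.getD t t = "USDT" ∨
    pvCanonDict.getD t t = "DAI" ∨ pvCanonDict.getD t t = t := by
  rcases pv_tok_cases t with h|h|h|h|h|h|h|h|h|h|h|h|h|h|h
  all_goals try (subst h; decide)
  exact Or.inr (Or.inr (Or.inr (Or.inr (Or.inr (pv_canon_outside t h)))))

lemma pv_loop_true_left (t1 t2 : String) (h : PvOutside t1) :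
    pvLoopA t1 t2 pvGroupsA = true := by
  obtain ⟨n0,n1,n2,n3,n4,n5,n6,n7,n8,n9,n10,n11,n12,n13⟩ := h
  simp [pvLoopA, pvGroupsA]
  tauto

lemma pv_loop_true_right (t1 t2 : String) (h : PvOutside t2) :
    pvLoopA t1 t2 pvGroupsA = true := by
  obtain ⟨n0,n1,n2,n3,n4,n5,n6,n7,n8,n9,n10,n11,n12,n13⟩ := h
  simp [pvLoopA, pvGroupsA]
  tauto

lemma pv_alt_true_left (t1 t2 : String) (he : ¬ t1 = t2) (h : PvOutside t1) :
    from_token_not_to_token_alt t1 t2 = true := by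
  have hc1 := pv_canon_outside t1 h
  obtain ⟨n0,n1,n2,n3,n4,n5,n6,n7,n8,n9,n10,n11,n12,n13⟩ := h
  show (pvCanonDict.getD t1 t1 != pvCanonDict.getD t2 t2) = true
  rw [hc1]
  rcases pv_canon_cases t2 with h2|h2|h2|h2|h2|h2 <;> rw [h2] <;> simp <;> tauto

lemma pv_alt_true_right (t1 t2 : String) (he : ¬ t1 = t2) (h : PvOutside t2) :
    from_token_not_to_token_alt t1 t2 = true := by
  have hc2 := pv_canon_outside t2 h
  obtain ⟨n0,n1,n2,n3,n4,n5,n6,n7,n8,n9,n10,n11,n12,n13⟩ := h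
  show (pvCanonDict.getD t1 t1 != pvCanonDict.getD t2 t2) = true
  rw [hc2]
  rcases pv_canon_cases t1 with h1|h1|h1|h1|h1|h1 <;> rw [h1] <;> simp <;> tauto

-- ===== VERDICT (by name: the statement is the Claim_ definition above) =====
theorem from_token_not_to_token_spec : Claim_equal_from_token_not_to_token := by
  intro t1 t2 _
  unfold Spec_from_token_not_to_token
  by_cases he : t1 = t2
  · subst he
    simp [from_token_not_to_token, from_token_not_to_token_alt]
  rcases pv_tok_cases t1 with h1|h1|h1|h1|h1|h1|h1|h1|h1|h1|h1|h1|h1|h1|h1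
  all_goals try subst h1
  all_goals first
    | (rw [pv_alt_true_left t1 t2 he h1]
       simp [from_token_not_to_token, he, pv_loop_true_left t1 t2 h1])
    | (rcases pv_tok_cases t2 with h2|h2|h2|h2|h2|h2|h2|h2|h2|h2|h2|h2|h2|h2|h2 <;>
        first
          | (subst h2; decide)
          | (rw [pv_alt_true_right _ t2 he h2]
             simp [from_token_not_to_token, he, pv_loop_true_right _ t2 h2]))
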